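-- pv_equiv track=rewrite | github.com/SynologyOpenSource/pkgscripts-ng | ProjectDepends.py | checkPlatform
-- ===== SOURCE A (Python) =====
-- def is64BitPlatform(platform):
--     listPlatform64 = ['x64', 'bromolow', 'cedarview', 'avoton', 'braswell']
--     if platform in listPlatform64:
--         return True
--     else:
--         return False
--
-- def checkPlatform(platforms):
--     bl64bit = True
--     bl32bit = True
--     for platform in platforms:
--         blPlatformArch = is64BitPlatform(platform)
--         bl64bit &= blPlatformArch
--         bl32bit &= not blPlatformArch
--
--     if bl32bit is True:
--         return "32"
--     if bl64bit is True:
--         return "64"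
--
--     return "mix"
-- ===== SOURCE B (Python) =====
-- def is64BitPlatform(platform):
--     listPlatform64 = ['x64', 'bromolow', 'cedarview', 'avoton', 'braswell']
--     if platform in listPlatform64:
--         return True
--     else:
--         return False
--
-- def checkPlatform(platforms):
--     if not platforms:
--         return "32"
--     first = is64BitPlatform(platforms[0])
--     for p in platforms[1:]:
--         if is64BitPlatform(p) != first:
--             return "mix"
--     return "64" if first else "32"
-- ===== Notes on version B (the rewrite author's own statement) =====
-- stated objective: simpler
-- what changed: Instead of folding two boolean accumulators with &= over the whole list and branching 32-before-64, B classifies the first element and scans the tail for the first differently-classified element, returning 'mix' immediately on a mismatch (early exit) and otherwise deciding from the first element's class; empty list returns '32' directly.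
import Mathlib
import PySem

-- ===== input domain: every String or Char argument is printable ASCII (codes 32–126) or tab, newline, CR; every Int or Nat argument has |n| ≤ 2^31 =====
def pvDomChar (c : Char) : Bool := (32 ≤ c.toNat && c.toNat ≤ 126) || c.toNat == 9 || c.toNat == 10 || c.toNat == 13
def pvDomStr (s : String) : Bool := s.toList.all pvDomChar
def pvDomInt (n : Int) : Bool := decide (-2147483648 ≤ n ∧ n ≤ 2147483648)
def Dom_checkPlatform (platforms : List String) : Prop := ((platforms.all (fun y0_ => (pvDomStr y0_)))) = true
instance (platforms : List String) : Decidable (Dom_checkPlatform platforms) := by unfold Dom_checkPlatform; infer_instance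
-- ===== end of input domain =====

-- B replaces A's two &=-folded boolean accumulators by classifying the first element
-- and scanning the tail for the first mismatch with early exit (objective: simpler).


-- ===== PORT A =====
def is64BitPlatform (platform : String) : Bool :=
  let listPlatform64 := ["x64", "bromolow", "cedarview", "avoton", "braswell"]
  if listPlatform64.contains platform then true else false

def checkPlatform (platforms : List String) : String :=
  let st := platforms.foldl (fun (s : Bool × Bool) platform =>
    let blPlatformArch := is64BitPlatform platform
    (s.1 && blPlatformArch, s.2 && !blPlatformArch)) (true, true)
  if st.2 = true then "32"
  else if st.1 = true then "64"
  else "mix"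

-- ===== PORT B =====
def is64BitPlatform_alt (platform : String) : Bool :=
  let listPlatform64 := ["x64", "bromolow", "cedarview", "avoton", "braswell"]
  if listPlatform64.contains platform then true else false

-- the `for p in platforms[1:]` loop with its early `return "mix"`
def checkPlatform_altLoop (first : Bool) : List String → String
  | [] => if first then "64" else "32"
  | p :: rest =>
    if is64BitPlatform_alt p ≠ first then "mix"
    else checkPlatform_altLoop first rest

def checkPlatform_alt (platforms : List String) : String :=
  match platforms with
  | [] => "32"
  | p0 :: rest => checkPlatform_altLoop (is64BitPlatform_alt p0) rest

-- ===== PRECONDITION & SPEC =====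
def Spec_checkPlatform (platforms : List String) (out : String) : Prop := out = checkPlatform_alt platforms
instance (platforms : List String) (out : String) : Decidable (Spec_checkPlatform platforms out) := by unfold Spec_checkPlatform; infer_instance

-- ===== CLAIM (what is proved, stated in full; the proofs are below) =====
def Claim_equal_checkPlatform : Prop := ∀ (platforms : List String), Dom_checkPlatform platforms → Spec_checkPlatform platforms (checkPlatform platforms)

-- ===== LEMMAS AND PROOFS =====

theorem is64_eq (p : String) : is64BitPlatform p = is64BitPlatform_alt p := rfl

-- A's fold, with generalized accumulator, equals two `all`s.
theorem checkPlatform_fold (l : List String) (a b : Bool) :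
    l.foldl (fun (s : Bool × Bool) platform =>
      let blPlatformArch := is64BitPlatform platform
      (s.1 && blPlatformArch, s.2 && !blPlatformArch)) (a, b)
    = (a && l.all is64BitPlatform, b && l.all (fun p => !is64BitPlatform p)) := by
  induction l generalizing a b with
  | nil => simp
  | cons x xs ih => simp [ih, Bool.and_assoc]

-- B's tail loop characterised: "mix" iff some tail element differs from `first`.
theorem altLoop_eq (first : Bool) (l : List String) :
    checkPlatform_altLoop first l =
      if l.all (fun p => is64BitPlatform_alt p == first) then
        (if first then "64" else "32")
      else "mix" := by
  induction l with
  | nil => simp [checkPlatform_altLoop]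
  | cons x xs ih =>
    by_cases hx : is64BitPlatform_alt x = first
    · simp [checkPlatform_altLoop, hx, ih]
    · simp [checkPlatform_altLoop, hx]

-- ===== VERDICT (by name: the statement is the Claim_ definition above) =====
theorem checkPlatform_spec : Claim_equal_checkPlatform := by
  intro platforms _
  unfold Spec_checkPlatform
  cases platforms with
  | nil => rfl
  | cons p0 rest =>
    unfold checkPlatform checkPlatform_alt
    simp only [checkPlatform_fold, Bool.true_and, altLoop_eq, List.all_cons]
    by_cases h0 : is64BitPlatform p0 = true
    · -- first element 64-bit
      by_cases hall : rest.all (fun p => is64BitPlatform_alt p == true) = true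
      · have h32 : (is64BitPlatform p0 :: rest.map is64BitPlatform).all (fun b => !b) = false := by
          simp [h0]
        have h64 : rest.all is64BitPlatform = true := by
          rw [List.all_eq_true] at hall ⊢
          intro p hp; have := hall p hp; rw [is64_eq]; simpa using this
        simp [h0, h64, ← is64_eq]
      · have h64 : rest.all is64BitPlatform = false := by
          rw [Bool.eq_false_iff]; intro hc; apply hall
          rw [List.all_eq_true] at hc ⊢
          intro p hp; have := hc p hp; rw [← is64_eq]; simpa using this
        simp [h0, h64, ← is64_eq]
    · -- first element 32-bit
      rw [Bool.not_eq_true] at h0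
      by_cases hall : rest.all (fun p => is64BitPlatform_alt p == false) = true
      · have h32 : rest.all (fun p => !is64BitPlatform p) = true := by
          rw [List.all_eq_true] at hall ⊢
          intro p hp; have := hall p hp; rw [is64_eq]; simpa using this
        simp [h0, h32, ← is64_eq]
      · have h32 : rest.all (fun p => !is64BitPlatform p) = false := by
          rw [Bool.eq_false_iff]; intro hc; apply hall
          rw [List.all_eq_true] at hc ⊢
          intro p hp; have := hc p hp; rw [← is64_eq]; simpa using this
        have h64 : (is64BitPlatform p0 :: rest.map is64BitPlatform).all id = false := by simp [h0]
        have hall' : (rest.all fun p => is64BitPlatform_alt p == is64BitPlatform_alt p0) = false := by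
          rw [← is64_eq p0, h0]; exact Bool.eq_false_iff.mpr hall
        simp [h0, h32, hall']
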